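-- pv_equiv track=rewrite | github.com/LLLLAAAA2333/bacteria_analysis | src/bacteria_analysis/rsa_outputs.py | _canonicalize_view_order
-- ===== SOURCE A (Python) =====
-- def _canonicalize_view_order(view_names: list[str]) -> list[str]:
--     unique_views = sorted({str(view_name) for view_name in view_names})
--     ordered_views: list[str] = []
--     for preferred_view in ("response_window", "full_trajectory"):
--         if preferred_view in unique_views:
--             ordered_views.append(preferred_view)
--             unique_views.remove(preferred_view)
--     ordered_views.extend(unique_views)
--     return ordered_views
-- ===== SOURCE B (Python) =====
-- def _canonicalize_view_order(view_names: list[str]) -> list[str]: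
--     priority = {"response_window": 0, "full_trajectory": 1}
--     unique_views = {str(view_name) for view_name in view_names}
--     return sorted(unique_views, key=lambda view: (priority.get(view, 2), view))
-- ===== Notes on version B (the rewrite author's own statement) =====
-- stated objective: idiomatic
-- what changed: Replaces sort-then-hoist (explicit loop over the two preferred names with membership tests and list.remove calls) by a single sort with a composite key (priority.get(view, 2), view) that places the preferred views first directly in the comparator.
import Mathlib
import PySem

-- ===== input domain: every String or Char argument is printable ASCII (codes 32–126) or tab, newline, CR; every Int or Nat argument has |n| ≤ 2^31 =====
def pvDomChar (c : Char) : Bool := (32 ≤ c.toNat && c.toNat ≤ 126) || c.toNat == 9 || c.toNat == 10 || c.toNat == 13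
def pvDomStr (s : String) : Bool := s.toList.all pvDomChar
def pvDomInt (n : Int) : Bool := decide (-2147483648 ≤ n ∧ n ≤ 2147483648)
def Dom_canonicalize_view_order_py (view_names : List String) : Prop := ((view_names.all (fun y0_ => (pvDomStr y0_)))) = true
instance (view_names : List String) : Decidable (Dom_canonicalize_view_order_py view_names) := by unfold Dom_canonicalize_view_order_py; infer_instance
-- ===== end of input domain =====

-- B replaces A's sort-then-hoist loop (membership tests + list.remove) by a single sort with a
-- composite key (priority.get(view, 2), view); objective: more idiomatic, same cost.

-- ===== PORT A =====
def canonicalize_view_order_py (view_names : List String) : List String :=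
  -- str(view_name) is the identity on str inputs; sorted(set(...)) with no key is order-safe
  let unique_views := PySem.List.sorted (PySem.Set.ofList (view_names.map (fun view_name => view_name))) (fun x => x) false
  let st := (["response_window", "full_trajectory"]).foldl
    (fun (st : List String × List String) preferred_view =>
      if preferred_view ∈ st.2 then
        -- list.remove is guarded by the membership test, so remove? is `some` here
        (st.1 ++ [preferred_view], (PySem.List.remove? st.2 preferred_view).getD st.2)
      else st)
    (([] : List String), unique_views)
  st.1 ++ st.2

-- ===== PORT B =====
def pvPriority : PySem.Dict String Int :=
  PySem.Dict.insert (PySem.Dict.insert PySem.Dict.empty "response_window" 0) "full_trajectory" 1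

def canonicalize_view_order_py_alt (view_names : List String) : List String :=
  -- sorted(set(...), key=...) is order-safe: the composite key is injective (second component is the element)
  PySem.List.sorted2 (PySem.Set.ofList (view_names.map (fun view_name => view_name)))
    (fun view => PySem.Dict.getD pvPriority view 2) (fun view => view) false

-- ===== PRECONDITION & SPEC =====
def Spec_canonicalize_view_order_py (view_names : List String) (out : List String) : Prop := out = canonicalize_view_order_py_alt view_names
instance (view_names : List String) (out : List String) : Decidable (Spec_canonicalize_view_order_py view_names out) := by unfold Spec_canonicalize_view_order_py; infer_instance

-- ===== CLAIM (what is proved, stated in full; the proofs are below) =====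
def Claim_equal_canonicalize_view_order_py : Prop := ∀ (view_names : List String), Dom_canonicalize_view_order_py view_names → Spec_canonicalize_view_order_py view_names (canonicalize_view_order_py view_names)

-- ===== LEMMAS AND PROOFS =====
lemma pv_sorted2_eq_sorted_lex {α : Type} (xs : List α) (k1 : α → Int) (k2 : α → String) :
    PySem.List.sorted2 xs k1 k2 false = PySem.List.sorted xs (fun x => toLex (k1 x, k2 x)) false := by
  rw [PySem.List.sorted_eq_foldl_insertBy]
  show (List.foldl (fun acc x => PySem.List.insertBy
      (fun a b => decide (k1 a < k1 b) || !decide (k1 b < k1 a) && decide (k2 a < k2 b)) x acc) [] xs) = _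
  congr 1
  funext acc x
  congr 1
  funext a b
  rcases lt_trichotomy (k1 a) (k1 b) with h | h | h
  · simp [Prod.Lex.toLex_lt_toLex, h, asymm h]
  · simp [Prod.Lex.toLex_lt_toLex, h]
  · simp [Prod.Lex.toLex_lt_toLex, h, asymm h, ne_of_gt h]

lemma pv_prio_other (v : String) (h1 : v ≠ "response_window") (h2 : v ≠ "full_trajectory") :
    PySem.Dict.getD pvPriority v 2 = 2 := by
  simp [pvPriority, PySem.Dict.getD, PySem.Dict.insert, PySem.Dict.empty, PySem.Dict.get?, List.find?,
    show ("response_window" == v) = false from beq_eq_false_iff_ne.mpr (Ne.symm h1),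
    show ("full_trajectory" == v) = false from beq_eq_false_iff_ne.mpr (Ne.symm h2)]

lemma pv_main (xs : List String) :
    canonicalize_view_order_py xs = canonicalize_view_order_py_alt xs := by
  unfold canonicalize_view_order_py canonicalize_view_order_py_alt
  rw [pv_sorted2_eq_sorted_lex]
  set s := PySem.Set.ofList (xs.map (fun v => v)) with hs
  set K : String → Lex (Int × String) := fun v => toLex (PySem.Dict.getD pvPriority v 2, v) with hK
  set u := PySem.List.sorted s (fun x => x) false with hu
  have hpw : u.Pairwise (· < ·) := PySem.List.sorted_ofList_pairwise_lt _
  have hperm : u.Perm s := PySem.List.sorted_perm _ _ _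
  have hnd : u.Nodup := hpw.imp ne_of_lt
  have hne : ("full_trajectory" : String) ≠ "response_window" := by decide
  have hKrw : K "response_window" = toLex ((0:Int), "response_window") := by rfl
  have hKft : K "full_trajectory" = toLex ((1:Int), "full_trajectory") := by rfl
  have hKother : ∀ v, v ≠ "response_window" → v ≠ "full_trajectory" → K v = toLex ((2:Int), v) := by
    intro v a b; simp [hK, pv_prio_other v a b]
  have hrest : ∀ (r : List String), r.Sublist u →
      (∀ v ∈ r, v ≠ "response_window" ∧ v ≠ "full_trajectory") →
      r.Pairwise (fun a b => K a < K b) := by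
    intro r hsub hmem
    refine ((hpw.sublist hsub).imp_of_mem ?_)
    intro a b ha hb hab
    rw [hKother a (hmem a ha).1 (hmem a ha).2, hKother b (hmem b hb).1 (hmem b hb).2]
    simp [Prod.Lex.toLex_lt_toLex, hab]
  by_cases h1 : "response_window" ∈ u <;> by_cases h2 : "full_trajectory" ∈ u
  · -- both present
    have hft' : "full_trajectory" ∈ u.erase "response_window" := (List.mem_erase_of_ne hne).mpr h2
    simp only [List.foldl, if_pos h1, PySem.List.remove?_eq_some_erase u _ h1, Option.getD_some,
      if_pos hft', PySem.List.remove?_eq_some_erase _ _ hft']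
    set r := (u.erase "response_window").erase "full_trajectory" with hr
    have hrsub : r.Sublist u := (List.erase_sublist).trans (List.erase_sublist)
    have hrmem : ∀ v ∈ r, v ≠ "response_window" ∧ v ≠ "full_trajectory" := by
      intro v hv
      have h2' := ((hnd.erase _).mem_erase_iff.mp hv)
      have h1' := (hnd.mem_erase_iff.mp h2'.2)
      exact ⟨h1'.1, h2'.1⟩
    refine (PySem.List.sorted_eq_of_perm_of_pairwise_lt _ _ _ ?_ ?_).symm
    · refine (((List.perm_cons_erase h1).trans ((List.perm_cons_erase hft').cons _)).symm).trans hperm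
    · refine List.pairwise_cons.mpr ⟨?_, List.pairwise_cons.mpr ⟨?_, hrest r hrsub hrmem⟩⟩
      · intro v hv
        rcases List.mem_cons.mp hv with rfl | hv
        · rw [hKrw, hKft]; simp [Prod.Lex.toLex_lt_toLex]
        · rw [hKrw, hKother v (hrmem v hv).1 (hrmem v hv).2]; simp [Prod.Lex.toLex_lt_toLex]
      · intro v hv
        rw [hKft, hKother v (hrmem v hv).1 (hrmem v hv).2]; simp [Prod.Lex.toLex_lt_toLex]
  · -- only response_window
    have hft' : "full_trajectory" ∉ u.erase "response_window" := by
      intro h; exact h2 (List.mem_of_mem_erase h)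
    simp only [List.foldl, if_pos h1, PySem.List.remove?_eq_some_erase u _ h1, Option.getD_some,
      if_neg hft']
    set r := u.erase "response_window" with hr
    have hrmem : ∀ v ∈ r, v ≠ "response_window" ∧ v ≠ "full_trajectory" := by
      intro v hv
      exact ⟨(hnd.mem_erase_iff.mp hv).1, fun hh => hft' (hh ▸ hv)⟩
    refine (PySem.List.sorted_eq_of_perm_of_pairwise_lt _ _ _ ?_ ?_).symm
    · exact ((List.perm_cons_erase h1).symm).trans hperm
    · refine List.pairwise_cons.mpr ⟨?_, hrest r List.erase_sublist hrmem⟩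
      intro v hv
      rw [hKrw, hKother v (hrmem v hv).1 (hrmem v hv).2]; simp [Prod.Lex.toLex_lt_toLex]
  · -- only full_trajectory
    simp only [List.foldl, if_neg h1, if_pos h2, PySem.List.remove?_eq_some_erase u _ h2,
      Option.getD_some]
    set r := u.erase "full_trajectory" with hr
    have hrmem : ∀ v ∈ r, v ≠ "response_window" ∧ v ≠ "full_trajectory" := by
      intro v hv
      exact ⟨fun hh => h1 (hh ▸ List.mem_of_mem_erase hv), (hnd.mem_erase_iff.mp hv).1⟩
    refine (PySem.List.sorted_eq_of_perm_of_pairwise_lt _ _ _ ?_ ?_).symm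
    · exact ((List.perm_cons_erase h2).symm).trans hperm
    · refine List.pairwise_cons.mpr ⟨?_, hrest r List.erase_sublist hrmem⟩
      intro v hv
      rw [hKft, hKother v (hrmem v hv).1 (hrmem v hv).2]; simp [Prod.Lex.toLex_lt_toLex]
  · -- neither
    simp only [List.foldl, if_neg h1, if_neg h2, List.nil_append]
    have hrmem : ∀ v ∈ u, v ≠ "response_window" ∧ v ≠ "full_trajectory" := by
      intro v hv
      exact ⟨fun hh => h1 (hh ▸ hv), fun hh => h2 (hh ▸ hv)⟩
    exact (PySem.List.sorted_eq_of_perm_of_pairwise_lt _ _ _ hperm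
      (hrest u (List.Sublist.refl u) hrmem)).symm

-- ===== VERDICT (by name: the statement is the Claim_ definition above) =====
theorem canonicalize_view_order_py_spec : Claim_equal_canonicalize_view_order_py := by
  intro xs _
  exact pv_main xs
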